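-- pv_equiv track=rewrite | github.com/hitechcloud-vietnam/dgxarley | dgxarley/integration/sglang_integration_test.py | _tail_lines
-- ===== SOURCE A (Python) =====
-- def _tail_lines(text: str, max_lines: int, wrap_width: int) -> tuple[str, bool]:
--     """Return the tail of *text* that fits within *max_lines* rendered lines.
--
--     Accounts for terminal line-wrapping at *wrap_width*.  Returns
--     ``(truncated_text, was_truncated)`` so callers can prepend an ellipsis
--     indicator when needed.
--     """
--     if max_lines <= 0 or not text:
--         return "", bool(text)
--     source_lines = text.rstrip("\n").split("\n")
--     taken: list[str] = []
--     used = 0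
--     for line in reversed(source_lines):
--         wrapped = max(1, -(-len(line) // wrap_width)) if wrap_width > 0 else 1
--         if used + wrapped > max_lines:
--             break
--         taken.append(line)
--         used += wrapped
--     taken.reverse()
--     return "\n".join(taken), len(taken) < len(source_lines)
-- ===== SOURCE B (Python) =====
-- def _tail_lines(text: str, max_lines: int, wrap_width: int) -> tuple[str, bool]:
--     """Tail of *text* fitting in *max_lines* wrapped lines, via a per-line
--     cost table + cumulative suffix sums instead of an early-exit loop."""
--     if max_lines <= 0 or not text:
--         return "", bool(text)
--     source_lines = text.rstrip("\n").split("\n")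
--     costs = [max(1, -(-len(l) // wrap_width)) if wrap_width > 0 else 1
--              for l in source_lines]
--     totals = []
--     s = 0
--     for c in reversed(costs):
--         s += c
--         totals.append(s)
--     k = sum(1 for t in totals if t <= max_lines)
--     cutoff = len(source_lines) - k
--     return "\n".join(source_lines[cutoff:]), cutoff > 0
-- ===== Notes on version B (the rewrite author's own statement) =====
-- stated objective: alternative
-- what changed: Replaces A's reversed early-exit loop that accumulates taken lines and used budget with a full per-line wrapped-cost table, cumulative suffix sums, a count of the sums that fit within max_lines, and a single slice of source_lines at the resulting cutoff.
import Mathlib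
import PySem

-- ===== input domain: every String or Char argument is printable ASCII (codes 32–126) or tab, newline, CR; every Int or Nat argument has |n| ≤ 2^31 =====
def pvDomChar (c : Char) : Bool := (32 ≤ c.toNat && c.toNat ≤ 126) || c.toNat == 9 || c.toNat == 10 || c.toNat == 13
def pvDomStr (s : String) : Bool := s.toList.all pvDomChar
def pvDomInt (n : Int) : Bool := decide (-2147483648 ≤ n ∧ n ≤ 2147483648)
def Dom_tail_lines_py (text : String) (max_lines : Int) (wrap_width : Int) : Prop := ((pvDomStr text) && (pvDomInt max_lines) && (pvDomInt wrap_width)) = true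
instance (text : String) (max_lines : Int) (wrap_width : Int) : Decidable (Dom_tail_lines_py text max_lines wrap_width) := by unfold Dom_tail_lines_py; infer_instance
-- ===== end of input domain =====

-- B replaces A's reversed early-exit accumulation loop by a full per-line cost
-- table, cumulative suffix sums, a count of the sums that fit, and one slice
-- (objective: alternative decomposition; same cost).

-- text.rstrip("\n"): hand port (PySem has no rstrip-with-chars); exact — drops exactly the trailing '\n' characters
def pvRstripNewlines (s : List Char) : List Char := (s.reverse.dropWhile (· == '\n')).reverse

-- text.rstrip("\n").split("\n") — identical preprocessing line in A and B
def pvSourceLines (text : String) : List String :=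
  (PySem.Chars.splitOn (pvRstripNewlines text.toList) ['\n']).map String.ofList

-- max(1, -(-len(line) // wrap_width)) if wrap_width > 0 else 1 — identical expression in A and B
def pvCost (wrap_width : Int) (l : String) : Int :=
  if wrap_width > 0 then max 1 (-(PySem.Int.floordiv (-(PySem.Str.len l)) wrap_width)) else 1

-- ===== PORT A =====
-- the 'for line in reversed(source_lines): … break' loop, state = (taken, used)
def pvLoopA (max_lines wrap_width : Int) : List String → List String × Int → List String × Int
  | [], st => st
  | l :: rest, (taken, used) =>
    let wrapped := pvCost wrap_width l
    if used + wrapped > max_lines then (taken, used)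
    else pvLoopA max_lines wrap_width rest (taken ++ [l], used + wrapped)

def tail_lines_py (text : String) (max_lines : Int) (wrap_width : Int) : String × Bool :=
  if max_lines ≤ 0 ∨ text = "" then ("", text != "")
  else
    let source_lines := pvSourceLines text
    let res := pvLoopA max_lines wrap_width source_lines.reverse ([], 0)
    let taken := res.1.reverse
    (PySem.Str.join "\n" taken, decide (taken.length < source_lines.length))

-- ===== PORT B =====
def tail_lines_py_alt (text : String) (max_lines : Int) (wrap_width : Int) : String × Bool :=
  if max_lines ≤ 0 ∨ text = "" then ("", text != "")
  else
    let source_lines := pvSourceLines text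
    let costs := source_lines.map (pvCost wrap_width)
    -- totals = []; s = 0; for c in reversed(costs): s += c; totals.append(s)
    let totals := (costs.reverse.foldl (fun st c => (st.1 + c, st.2 ++ [st.1 + c])) ((0 : Int), ([] : List Int))).2
    -- k = sum(1 for t in totals if t <= max_lines)
    let k : Nat := totals.countP (fun t => decide (t ≤ max_lines))
    let cutoff : Int := (source_lines.length : Int) - (k : Int)
    (PySem.Str.join "\n" (PySem.List.slice source_lines (some cutoff) none), decide (cutoff > 0))

-- ===== PRECONDITION & SPEC =====
def Spec_tail_lines_py (text : String) (max_lines : Int) (wrap_width : Int) (out : String × Bool) : Prop := out = tail_lines_py_alt text max_lines wrap_width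
instance (text : String) (max_lines : Int) (wrap_width : Int) (out : String × Bool) : Decidable (Spec_tail_lines_py text max_lines wrap_width out) := by unfold Spec_tail_lines_py; infer_instance

-- ===== CLAIM (what is proved, stated in full; the proofs are below) =====
def Claim_equal_tail_lines_py : Prop := ∀ (text : String) (max_lines : Int) (wrap_width : Int), Dom_tail_lines_py text max_lines wrap_width → Spec_tail_lines_py text max_lines wrap_width (tail_lines_py text max_lines wrap_width)

-- ===== LEMMAS AND PROOFS =====

-- greedy count of lines A takes, phrased on the cost list (proof-only helper)
def pvGc (M : Int) : List Int → Int → Nat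
  | [], _ => 0
  | c :: r, s => if s + c > M then 0 else 1 + pvGc M r (s + c)

-- the cumulative-sum list B's foldl builds (proof-only helper)
def pvAccum : List Int → Int → List Int
  | [], _ => []
  | c :: r, s => (s + c) :: pvAccum r (s + c)

theorem pvCost_ge_one (w : Int) (l : String) : 1 ≤ pvCost w l := by
  unfold pvCost
  split_ifs with h
  · exact le_max_left _ _
  · exact le_refl 1

theorem pvLoopA_fst (M w : Int) (ls : List String) (taken : List String) (used : Int) :
    (pvLoopA M w ls (taken, used)).1 = taken ++ ls.take (pvGc M (ls.map (pvCost w)) used) := by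
  induction ls generalizing taken used with
  | nil => simp [pvLoopA, pvGc]
  | cons l rest ih =>
    simp only [pvLoopA, pvGc, List.map_cons]
    split_ifs with h
    · simp
    · rw [ih, Nat.add_comm, List.take_succ_cons]
      simp

theorem pvFoldl_accum (cs : List Int) (s : Int) (acc : List Int) :
    (cs.foldl (fun st c => (st.1 + c, st.2 ++ [st.1 + c])) (s, acc)).2 = acc ++ pvAccum cs s := by
  induction cs generalizing s acc with
  | nil => simp [pvAccum]
  | cons c r ih => simp [pvAccum, List.foldl_cons, ih]

theorem pvAccum_ge (cs : List Int) (s : Int) (hc : ∀ c ∈ cs, 1 ≤ c) :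
    ∀ t ∈ pvAccum cs s, s + 1 ≤ t := by
  induction cs generalizing s with
  | nil => simp [pvAccum]
  | cons c r ih =>
    intro t ht
    simp only [pvAccum, List.mem_cons] at ht
    have hc1 : 1 ≤ c := hc c (by simp)
    rcases ht with rfl | ht
    · omega
    · have := ih (s + c) (fun x hx => hc x (by simp [hx])) t ht
      omega

theorem pvCountP_accum (M : Int) (cs : List Int) (s : Int) (hc : ∀ c ∈ cs, 1 ≤ c) :
    (pvAccum cs s).countP (fun t => decide (t ≤ M)) = pvGc M cs s := by
  induction cs generalizing s with
  | nil => simp [pvAccum, pvGc]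
  | cons c r ih =>
    simp only [pvAccum, pvGc]
    split_ifs with h
    · rw [List.countP_eq_zero]
      intro t ht
      simp only [List.mem_cons] at ht
      rcases ht with rfl | ht
      · simpa using h
      · have := pvAccum_ge r (s + c) (fun x hx => hc x (by simp [hx])) t ht
        simp only [decide_eq_true_eq]
        omega
    · rw [List.countP_cons, ih (s + c) (fun x hx => hc x (by simp [hx]))]
      rw [if_pos (by simpa using h)]
      omega

theorem pvGc_le_length (M : Int) (cs : List Int) (s : Int) : pvGc M cs s ≤ cs.length := by
  induction cs generalizing s with
  | nil => simp [pvGc]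
  | cons c r ih =>
    simp only [pvGc]
    split_ifs with h
    · simp
    · simp only [List.length_cons]
      have := ih (s + c)
      omega

-- ===== VERDICT (by name: the statement is the Claim_ definition above) =====
theorem tail_lines_py_spec : Claim_equal_tail_lines_py := by
  unfold Claim_equal_tail_lines_py Spec_tail_lines_py
  intro text max_lines wrap_width _
  unfold tail_lines_py tail_lines_py_alt
  split_ifs with h
  · rfl
  · dsimp only
    generalize pvSourceLines text = ls
    have hg_le : pvGc max_lines ((ls.map (pvCost wrap_width)).reverse) 0 ≤ ls.length := by
      have := pvGc_le_length max_lines ((ls.map (pvCost wrap_width)).reverse) 0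
      simpa using this
    set g : Nat := pvGc max_lines ((ls.map (pvCost wrap_width)).reverse) 0 with hg
    have hA : (pvLoopA max_lines wrap_width ls.reverse ([], 0)).1 = ls.reverse.take g := by
      have := pvLoopA_fst max_lines wrap_width ls.reverse [] 0
      simpa [List.map_reverse] using this
    have htot : ((ls.map (pvCost wrap_width)).reverse.foldl
        (fun st c => (st.1 + c, st.2 ++ [st.1 + c])) ((0 : Int), ([] : List Int))).2
        = pvAccum ((ls.map (pvCost wrap_width)).reverse) 0 := by
      rw [pvFoldl_accum]
      simp
    have hk : (pvAccum ((ls.map (pvCost wrap_width)).reverse) 0).countP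
        (fun t => decide (t ≤ max_lines)) = g := by
      rw [hg]
      apply pvCountP_accum
      intro c hc
      simp only [List.mem_reverse, List.mem_map] at hc
      obtain ⟨l, _, rfl⟩ := hc
      exact pvCost_ge_one _ _
    have hcut : ((ls.length : Int) - (g : Int)) = ((ls.length - g : Nat) : Int) := by omega
    have hslice : PySem.List.slice ls (some ((ls.length : Int) - (g : Int))) none
        = ls.drop (ls.length - g) := by
      rw [hcut, PySem.List.slice_from_natCast]
    have htake : (ls.reverse.take g).reverse = ls.drop (ls.length - g) := by
      rw [List.take_reverse, List.reverse_reverse]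
    have hlen : (ls.reverse.take g).reverse.length = g := by
      simp [hg_le]
    rw [hA, htot, hk]
    refine Prod.ext ?_ ?_
    · simp only [hslice, htake]
    · simp only [decide_eq_decide, hlen]
      omega
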